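-- pv_equiv track=rewrite | github.com/proxima-k/beginner-python-projects | 07_Base Jumper.py | base_10
-- ===== SOURCE A (Python) =====
-- def base_10(no_to_10, b_in, l_base):
--     l_no = []
--     result_value = 0
--     for index in no_to_10:
--         for i, j in enumerate(l_base):
--             if j == index:
--                 l_no.append(i)
--     l_no.reverse()
--     for i, j in enumerate(l_no):
--         result_value = result_value + ((b_in ** i) * j)
--
--     return int(result_value)
-- ===== SOURCE B (Python) =====
-- def base_10(no_to_10, b_in, l_base):
--     # Horner's method: single accumulator, no intermediate digit list, no reverse, no pow
--     result_value = 0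
--     for symbol in no_to_10:
--         for i, j in enumerate(l_base):
--             if j == symbol:
--                 result_value = result_value * b_in + i
--     return int(result_value)
-- ===== Notes on version B (the rewrite author's own statement) =====
-- stated objective: faster
-- what changed: Replaces A's intermediate digit list, in-place reverse and power-sum (b_in**i recomputed per digit) with a single Horner accumulator updated in one pass (result = result*b_in + i).
import Mathlib
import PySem

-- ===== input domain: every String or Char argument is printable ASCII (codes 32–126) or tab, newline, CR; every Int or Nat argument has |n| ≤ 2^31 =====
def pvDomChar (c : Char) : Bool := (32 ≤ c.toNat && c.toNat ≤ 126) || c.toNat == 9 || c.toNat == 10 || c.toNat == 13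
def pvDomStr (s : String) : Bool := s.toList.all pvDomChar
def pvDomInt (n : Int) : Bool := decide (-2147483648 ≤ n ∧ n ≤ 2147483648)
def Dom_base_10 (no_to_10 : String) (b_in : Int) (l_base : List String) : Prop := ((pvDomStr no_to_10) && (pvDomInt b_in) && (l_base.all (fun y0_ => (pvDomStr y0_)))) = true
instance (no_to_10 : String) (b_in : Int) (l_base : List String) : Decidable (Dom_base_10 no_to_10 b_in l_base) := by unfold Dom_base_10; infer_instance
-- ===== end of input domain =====

-- B replaces A's digit list + reverse + power sum with a single Horner accumulator (objective: simpler).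

-- ===== PORT A =====
-- A: collect matched indices into l_no, reverse it, then sum b_in**i * digit.
-- enumerate indices are ≥ 0, so `b_in ^ ij.1.toNat` is exactly Python's `b_in ** i`.
def base_10 (no_to_10 : String) (b_in : Int) (l_base : List String) : Int :=
  let l_no : List Int := no_to_10.toList.foldl
    (fun l_no index =>
      (PySem.List.enumerate l_base).foldl
        (fun acc ij => if ij.2 = index.toString then acc ++ [ij.1] else acc) l_no) []
  let l_no := l_no.reverse
  (PySem.List.enumerate l_no).foldl (fun r ij => r + (b_in ^ ij.1.toNat) * ij.2) 0

-- ===== PORT B =====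
-- B: one pass, Horner's rule: at each matched index i, result := result * b_in + i.
def base_10_alt (no_to_10 : String) (b_in : Int) (l_base : List String) : Int :=
  no_to_10.toList.foldl
    (fun result symbol =>
      (PySem.List.enumerate l_base).foldl
        (fun r ij => if ij.2 = symbol.toString then r * b_in + ij.1 else r) result) 0

-- ===== PRECONDITION & SPEC =====
def Spec_base_10 (no_to_10 : String) (b_in : Int) (l_base : List String) (out : Int) : Prop := out = base_10_alt no_to_10 b_in l_base
instance (no_to_10 : String) (b_in : Int) (l_base : List String) (out : Int) : Decidable (Spec_base_10 no_to_10 b_in l_base out) := by unfold Spec_base_10; infer_instance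

-- ===== CLAIM (what is proved, stated in full; the proofs are below) =====
def Claim_equal_base_10 : Prop := ∀ (no_to_10 : String) (b_in : Int) (l_base : List String), Dom_base_10 no_to_10 b_in l_base → Spec_base_10 no_to_10 b_in l_base (base_10 no_to_10 b_in l_base)

-- ===== LEMMAS AND PROOFS =====

-- the digits a single symbol contributes (matched indices, in scan order)
def pvDig (E : List (Int × String)) (s : String) : List Int :=
  (E.filter (fun ij => ij.2 = s)).map (·.1)

theorem pvInnerA (E : List (Int × String)) (s : String) : ∀ (acc : List Int),
    E.foldl (fun acc ij => if ij.2 = s then acc ++ [ij.1] else acc) acc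
      = acc ++ pvDig E s := by
  induction E with
  | nil => intro acc; simp [pvDig]
  | cons ij t ih =>
    intro acc
    by_cases h : ij.2 = s <;> simp [pvDig, h, ih] at *

theorem pvInnerB (E : List (Int × String)) (s : String) (b : Int) : ∀ (a : Int),
    E.foldl (fun r ij => if ij.2 = s then r * b + ij.1 else r) a
      = (pvDig E s).foldl (fun r x => r * b + x) a := by
  induction E with
  | nil => intro a; simp [pvDig]
  | cons ij t ih =>
    intro a
    by_cases h : ij.2 = s <;> simp [pvDig, h] at * <;> simp [ih]

theorem pvOuterA (E : List (Int × String)) : ∀ (cs : List Char) (acc : List Int),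
    cs.foldl (fun l_no c =>
        E.foldl (fun acc ij => if ij.2 = c.toString then acc ++ [ij.1] else acc) l_no) acc
      = acc ++ cs.flatMap (fun c => pvDig E c.toString) := by
  intro cs
  induction cs with
  | nil => intro acc; simp
  | cons c t ih =>
    intro acc
    simp only [List.foldl_cons, List.flatMap_cons]
    rw [pvInnerA, ih, List.append_assoc]

theorem pvOuterB (E : List (Int × String)) (b : Int) : ∀ (cs : List Char) (a : Int),
    cs.foldl (fun result c =>
        E.foldl (fun r ij => if ij.2 = c.toString then r * b + ij.1 else r) result) a
      = (cs.flatMap (fun c => pvDig E c.toString)).foldl (fun r x => r * b + x) a := by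
  intro cs
  induction cs with
  | nil => intro a; simp
  | cons c t ih =>
    intro a
    simp only [List.foldl_cons, List.flatMap_cons, List.foldl_append]
    rw [pvInnerB, ih]

theorem pvHornerShift (b : Int) : ∀ (l : List Int) (a : Int),
    l.foldl (fun r x => r * b + x) a = a * b ^ l.length + l.foldl (fun r x => r * b + x) 0 := by
  intro l
  induction l with
  | nil => intro a; simp
  | cons x t ih =>
    intro a
    simp only [List.foldl_cons, List.length_cons]
    rw [ih (a * b + x), ih (0 * b + x)]
    ring

theorem pvPsumRev (b : Int) : ∀ (l : List Int),
    (PySem.List.enumerate l.reverse).foldl (fun r ij => r + (b ^ ij.1.toNat) * ij.2) 0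
      = l.foldl (fun r x => r * b + x) 0 := by
  intro l
  induction l with
  | nil => simp [PySem.List.enumerate_nil]
  | cons x t ih =>
    simp only [List.reverse_cons]
    rw [PySem.List.enumerate_append, List.foldl_append]
    simp only [PySem.List.enumerate_cons, PySem.List.enumerate_nil, List.foldl_cons,
      List.foldl_nil, ih, List.foldl_cons]
    rw [pvHornerShift b t (0 * b + x)]
    simp only [List.length_reverse]
    have : ((0 : Int) + ↑t.length).toNat = t.length := by omega
    rw [this]
    ring

-- ===== VERDICT (by name: the statement is the Claim_ definition above) =====
theorem base_10_spec : Claim_equal_base_10 := by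
  intro no_to_10 b_in l_base _
  unfold Spec_base_10 base_10 base_10_alt
  rw [pvOuterA, pvOuterB, List.nil_append, pvPsumRev]
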